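-- pv_equiv track=rewrite | github.com/SimonB00/PythonExercises | Es29.py | column_sum
-- ===== SOURCE A (Python) =====
-- def column_sum(matrix):
--     sum1 = 0
--     sum2 = 0
--     sum3 = 0
--     for row in matrix:
--         if row[0] != 0:
--             sum1 += row[0]
--         else:
--             sum1 = 7
--         if row[1] != 0:
--             sum2 += row[1]
--         else:
--             sum2 = 7
--         if row[2] != 0:
--             sum3 += row[2]
--         else:
--             sum3 = 7
--
--     return [sum1, sum2, sum3]
-- ===== SOURCE B (Python) =====
-- def _col(rows, j):
--     acc = 0
--     for row in rows:
--         v = row[j]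
--         acc = 7 if v == 0 else acc + v
--     return acc
--
-- def column_sum(matrix):
--     rows = list(matrix)
--     return [_col(rows, j) for j in range(3)]
-- ===== Notes on version B (the rewrite author's own statement) =====
-- stated objective: simpler
-- what changed: Replaces the single interleaved pass carrying three accumulators with three independent per-column reductions via a small helper over a materialized row list.
import Mathlib
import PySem

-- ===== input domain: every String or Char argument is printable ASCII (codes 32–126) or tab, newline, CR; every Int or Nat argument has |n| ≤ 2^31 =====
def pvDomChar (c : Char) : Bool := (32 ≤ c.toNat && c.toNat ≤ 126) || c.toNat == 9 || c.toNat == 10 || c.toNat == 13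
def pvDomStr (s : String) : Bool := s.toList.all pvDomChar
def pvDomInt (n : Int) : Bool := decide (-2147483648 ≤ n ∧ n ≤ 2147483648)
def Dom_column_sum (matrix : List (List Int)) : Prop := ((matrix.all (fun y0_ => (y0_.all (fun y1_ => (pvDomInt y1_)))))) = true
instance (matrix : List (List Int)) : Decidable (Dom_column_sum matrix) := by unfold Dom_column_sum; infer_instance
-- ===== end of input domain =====

-- B computes the three results with independent per-column reductions instead of one interleaved three-accumulator pass (objective: simpler).

-- ===== PORT A =====
-- one pass over the rows carrying the triple (sum1, sum2, sum3); row[j] via pyGetD (the default is never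
-- reached under Pre_, which excludes the rows on which Python raises IndexError)
def column_sum (matrix : List (List Int)) : List Int :=
  let s := matrix.foldl
    (fun (s : Int × Int × Int) row =>
      let s1 := if PySem.List.pyGetD row 0 0 ≠ 0 then s.1 + PySem.List.pyGetD row 0 0 else 7
      let s2 := if PySem.List.pyGetD row 1 0 ≠ 0 then s.2.1 + PySem.List.pyGetD row 1 0 else 7
      let s3 := if PySem.List.pyGetD row 2 0 ≠ 0 then s.2.2 + PySem.List.pyGetD row 2 0 else 7
      (s1, s2, s3))
    (0, 0, 0)
  [s.1, s.2.1, s.2.2]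

-- ===== PORT B =====
-- helper _col: reduce a single column j over the rows
def colReduce (rows : List (List Int)) (j : Int) : Int :=
  rows.foldl
    (fun acc row =>
      let v := PySem.List.pyGetD row j 0
      if v = 0 then 7 else acc + v)
    0

def column_sum_alt (matrix : List (List Int)) : List Int :=
  (PySem.List.pyRange 0 3 1).map (fun j => colReduce matrix j)

-- ===== PRECONDITION & SPEC =====
-- Pre_ excludes exactly the inputs on which Python A raises IndexError: a row with fewer than 3 entries.
def Pre_column_sum (matrix : List (List Int)) : Prop :=
  (matrix.all (fun row => 3 ≤ row.length)) = true
instance (matrix : List (List Int)) : Decidable (Pre_column_sum matrix) := by unfold Pre_column_sum; infer_instance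
def pvWitness_column_sum : List (List Int) := [[1, 0, 2], [3, 4, 5]]
def Spec_column_sum (matrix : List (List Int)) (out : List Int) : Prop := out = column_sum_alt matrix
instance (matrix : List (List Int)) (out : List Int) : Decidable (Spec_column_sum matrix out) := by unfold Spec_column_sum; infer_instance

-- ===== CLAIM (what is proved, stated in full; the proofs are below) =====
def Claim_equal_column_sum : Prop := ∀ (matrix : List (List Int)), Dom_column_sum matrix → Pre_column_sum matrix → Spec_column_sum matrix (column_sum matrix)

-- ===== LEMMAS AND PROOFS =====
-- the interleaved fold over the triple is componentwise the three per-column folds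
theorem foldl_triple_eq (matrix : List (List Int)) (a b c : Int) :
    matrix.foldl
      (fun (s : Int × Int × Int) row =>
        let s1 := if PySem.List.pyGetD row 0 0 ≠ 0 then s.1 + PySem.List.pyGetD row 0 0 else 7
        let s2 := if PySem.List.pyGetD row 1 0 ≠ 0 then s.2.1 + PySem.List.pyGetD row 1 0 else 7
        let s3 := if PySem.List.pyGetD row 2 0 ≠ 0 then s.2.2 + PySem.List.pyGetD row 2 0 else 7
        (s1, s2, s3))
      (a, b, c)
    = (matrix.foldl (fun acc row => let v := PySem.List.pyGetD row 0 0; if v = 0 then 7 else acc + v) a,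
       matrix.foldl (fun acc row => let v := PySem.List.pyGetD row 1 0; if v = 0 then 7 else acc + v) b,
       matrix.foldl (fun acc row => let v := PySem.List.pyGetD row 2 0; if v = 0 then 7 else acc + v) c) := by
  induction matrix generalizing a b c with
  | nil => rfl
  | cons r rs ih =>
      simp only [List.foldl_cons]
      rw [ih]
      congr 1 <;> [skip; congr 1] <;> split_ifs <;> simp_all

-- ===== VERDICT (by name: the statement is the Claim_ definition above) =====
theorem column_sum_spec : Claim_equal_column_sum := by
  intro matrix _ _
  unfold Spec_column_sum column_sum column_sum_alt colReduce
  simp only [foldl_triple_eq]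
  rfl
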